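-- pv_equiv track=rewrite | github.com/Tony-1203/Tony-1203.github.io | mbti_database/test.py | extractOption
-- ===== SOURCE A (Python) =====
-- def extractOption(options):
--     option_A = ""
--     option_B = ""
--     is_optionA = True
--     is_optionB = False
--     for char in options:
--         if char == 'B':
--             is_optionB = True
--             continue
--         if char != 'A' and not is_optionB:
--             option_A += char
--         if is_optionB:
--             option_B += char
--     return option_A.strip(), option_B.strip()
-- ===== SOURCE B (Python) =====
-- def extractOption(options):
--     idx = options.find('B')
--     if idx == -1:
--         return options.replace('A', '').strip(), ""
--     return (options[:idx].replace('A', '').strip(),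
--             options[idx:].replace('B', '').strip())
-- ===== Notes on version B (the rewrite author's own statement) =====
-- stated objective: faster
-- what changed: Replaces the char-by-char accumulation loop with two state flags by one find of the first 'B' and slice/replace/strip of the two halves, done by C-level string primitives.
import Mathlib
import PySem

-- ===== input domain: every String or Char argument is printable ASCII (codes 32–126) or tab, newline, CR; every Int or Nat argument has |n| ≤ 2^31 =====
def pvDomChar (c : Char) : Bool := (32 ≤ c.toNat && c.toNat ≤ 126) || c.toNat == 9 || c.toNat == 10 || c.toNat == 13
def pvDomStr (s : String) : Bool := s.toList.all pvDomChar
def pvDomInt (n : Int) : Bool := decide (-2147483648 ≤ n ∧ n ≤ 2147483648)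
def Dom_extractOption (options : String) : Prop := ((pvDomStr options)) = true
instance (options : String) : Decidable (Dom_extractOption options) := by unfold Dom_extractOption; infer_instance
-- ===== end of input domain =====

-- B locates the first 'B' once with find and returns slice+replace+strip of the two halves, instead of A's char-by-char loop with two flags; objective: simpler.

-- ===== PORT A =====
-- one iteration of A's for-loop (A's growing strings are kept as char lists, joined at the end)
def extractOptionStep (s : List Char × List Char × Bool) (char : Char) : List Char × List Char × Bool :=
  let (optionA, optionB, isOptionB) := s
  if char = 'B' then (optionA, optionB, true)       -- is_optionB = True; continue
  else
    let optionA := if char ≠ 'A' ∧ ¬ isOptionB then optionA ++ [char] else optionA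
    let optionB := if isOptionB then optionB ++ [char] else optionB
    (optionA, optionB, isOptionB)

def extractOption (options : String) : String × String :=
  let st := options.toList.foldl extractOptionStep ([], [], false)
  (PySem.Str.strip (String.ofList st.1), PySem.Str.strip (String.ofList st.2.1))

-- ===== PORT B =====
def extractOption_alt (options : String) : String × String :=
  let idx := PySem.Str.find options "B"
  if idx = -1 then
    (PySem.Str.strip (PySem.Str.replace options "A" ""), "")
  else
    (PySem.Str.strip (PySem.Str.replace (PySem.Str.slice options none (some idx)) "A" ""),
     PySem.Str.strip (PySem.Str.replace (PySem.Str.slice options (some idx) none) "B" ""))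

-- ===== PRECONDITION & SPEC =====
def Spec_extractOption (options : String) (out : String × String) : Prop := out = extractOption_alt options
instance (options : String) (out : String × String) : Decidable (Spec_extractOption options out) := by unfold Spec_extractOption; infer_instance

-- ===== CLAIM (what is proved, stated in full; the proofs are below) =====
def Claim_equal_extractOption : Prop := ∀ (options : String), Dom_extractOption options → Spec_extractOption options (extractOption options)

-- ===== LEMMAS AND PROOFS =====

-- s.replace(b, '') removes every occurrence of the single character b
theorem replace_go_single (b : Char) : ∀ (l : List Char) (fuel : Nat) (acc : List Char),
    l.length ≤ fuel →
    PySem.Chars.replace.go [b] [] fuel l acc = acc.reverse ++ l.filter (fun c => c ≠ b) := by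
  intro l
  induction l with
  | nil => intro fuel acc h; cases fuel <;> simp [PySem.Chars.replace.go]
  | cons c t ih =>
    intro fuel acc h
    cases fuel with
    | zero => simp at h
    | succ f =>
      simp only [PySem.Chars.replace.go, List.isPrefixOf]
      by_cases hc : b = c
      · subst hc
        simp only [beq_self_eq_true, Bool.true_and, if_pos, List.length_cons, List.drop_succ_cons,
          List.length_nil, List.drop_zero, List.reverse_nil, List.nil_append]
        rw [ih f acc (by simpa using h)]
        simp
      · simp only [beq_eq_false_iff_ne.mpr hc, Bool.false_and, Bool.false_eq_true, if_false]
        rw [ih f (c :: acc) (by simpa using h)]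
        simp [Ne.symm hc]
theorem replace_single (b : Char) (l : List Char) :
    PySem.Chars.replace l [b] [] = l.filter (fun c => c ≠ b) := by
  rw [PySem.Chars.replace]
  simp only [List.isEmpty_cons, Bool.false_eq_true, if_false]
  exact replace_go_single b l l.length [] le_rfl

theorem foldl_step_after : ∀ (l a bAcc : List Char),
    l.foldl extractOptionStep (a, bAcc, true)
      = (a, bAcc ++ l.filter (fun c => c ≠ 'B'), true) := by
  intro l
  induction l with
  | nil => simp
  | cons c t ih =>
    intro a bAcc
    by_cases hc : c = 'B'
    · subst hc; simp [extractOptionStep, ih]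
    · simp [extractOptionStep, hc, ih]

theorem foldl_step_main : ∀ (l a bAcc : List Char),
    l.foldl extractOptionStep (a, bAcc, false)
      = (a ++ (l.takeWhile (fun c => c ≠ 'B')).filter (fun c => c ≠ 'A'),
         bAcc ++ (l.dropWhile (fun c => c ≠ 'B')).filter (fun c => c ≠ 'B'),
         decide ('B' ∈ l)) := by
  intro l
  induction l with
  | nil => simp
  | cons c t ih =>
    intro a bAcc
    by_cases hc : c = 'B'
    · subst hc
      simp [extractOptionStep, foldl_step_after]
    · by_cases ha : c = 'A'
      · subst ha
        simp [extractOptionStep, ih, hc]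
      · simp [extractOptionStep, ih, hc, ha, Ne.symm hc]

theorem find_singleton_of_not_mem (l : List Char) (h : 'B' ∉ l) :
    PySem.Chars.find l ['B'] = -1 := by
  rw [PySem.Chars.find_eq_neg_one_iff]
  intro hinf
  exact h ((List.singleton_infix_iff 'B' l).mp hinf)

theorem singleton_prefix_drop (l : List Char) (i : Nat) :
    ['B'] <+: l.drop i ↔ l[i]? = some 'B' := by
  constructor
  · rintro ⟨t, ht⟩
    have : (l.drop i)[0]? = some 'B' := by rw [← ht]; rfl
    simpa using this
  · intro h
    have hi : i < l.length := by
      by_contra hge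
      rw [List.getElem?_eq_none (by omega)] at h
      simp at h
    refine ⟨l.drop (i+1), ?_⟩
    have := List.getElem?_eq_some_iff.mp h
    obtain ⟨hlt, hget⟩ := this
    calc ['B'] ++ l.drop (i+1) = l[i] :: l.drop (i+1) := by rw [hget]; rfl
    _ = l.drop i := List.getElem_cons_drop hi

-- takeWhile/take: if first n chars are ≠ 'B' and the nth is 'B'
theorem takeWhile_eq_take_of (p : Char → Bool) : ∀ (l : List Char) (n : Nat),
    (∀ i, i < n → ∀ c, l[i]? = some c → p c = true) → (∀ c, l[n]? = some c → p c = false) →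
    l.takeWhile p = l.take n := by
  intro l
  induction l with
  | nil => simp
  | cons c t ih =>
    intro n h1 h2
    cases n with
    | zero =>
      have := h2 c rfl
      simp [this]
    | succ m =>
      have hc : p c = true := h1 0 (by omega) c rfl
      simp only [List.takeWhile_cons, hc, if_pos, List.take_succ_cons]
      rw [ih m (fun i hi d hd => h1 (i+1) (by omega) d (by simpa using hd))
            (fun d hd => h2 d (by simpa using hd))]

theorem find_singleton_of_mem (l : List Char) (h : 'B' ∈ l) :
    PySem.Chars.find l ['B'] = ((l.takeWhile (fun c => c ≠ 'B')).length : Int) := by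
  have h0 : 0 ≤ PySem.Chars.find l ['B'] :=
    (PySem.Chars.find_nonneg_iff l ['B']).mpr ((List.singleton_infix_iff 'B' l).mpr h)
  obtain ⟨hpre, hmin⟩ := PySem.Chars.find_spec (s := l) (sub := ['B']) h0
  set n := (PySem.Chars.find l ['B']).toNat with hn
  have hget : l[n]? = some 'B' := (singleton_prefix_drop l n).mp hpre
  have htw : l.takeWhile (fun c => c ≠ 'B') = l.take n := by
    apply takeWhile_eq_take_of
    · intro i hi c hc
      by_contra hne
      have : c = 'B' := by simpa using hne
      exact hmin i hi ((singleton_prefix_drop l i).mpr (this ▸ hc))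
    · intro c hc
      rw [hget] at hc
      have : c = 'B' := (Option.some.injEq _ _ ▸ hc.symm : c = 'B')
      simp [this]
  have hlt : n < l.length := List.getElem?_eq_some_iff.mp hget |>.1
  rw [htw, List.length_take, min_eq_left (by omega)]
  omega

theorem drop_len_takeWhile (p : Char → Bool) : ∀ (l : List Char),
    l.drop (l.takeWhile p).length = l.dropWhile p := by
  intro l
  induction l with
  | nil => rfl
  | cons c t ih =>
    by_cases hc : p c
    · simp [hc, ih]
    · simp [hc]


-- ===== VERDICT (by name: the statement is the Claim_ definition above) =====
theorem extractOption_spec : Claim_equal_extractOption := by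
  intro options _
  unfold Spec_extractOption
  simp only [extractOption, extractOption_alt]
  have hA : "A".toList = ['A'] := rfl
  have hBs : "B".toList = ['B'] := rfl
  have hE : "".toList = [] := rfl
  simp only [foldl_step_main options.toList [] [], List.nil_append]
  have hfind : PySem.Str.find options "B" = PySem.Chars.find options.toList ['B'] := by
    simp [PySem.Str.find_eq]
  by_cases hB : 'B' ∈ options.toList
  · rw [hfind, find_singleton_of_mem options.toList hB]
    have hlen : ((options.toList.takeWhile (fun c => c ≠ 'B')).length : Int) ≠ -1 := by
      omega
    rw [if_neg hlen]
    apply Prod.ext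
    · apply String.toList_inj.mp
      simp only [PySem.Str.toList_strip, PySem.Str.toList_replace, PySem.Str.toList_slice, PySem.Chars.slice_eq_listSlice]
      apply congrArg PySem.Chars.strip
      rw [hA, hE, PySem.List.slice_to_natCast]
      simp only [String.toList_ofList]
      rw [replace_single, (List.prefix_iff_eq_take.mp (List.takeWhile_prefix _)).symm]
    · apply String.toList_inj.mp
      simp only [PySem.Str.toList_strip, PySem.Str.toList_replace, PySem.Str.toList_slice, PySem.Chars.slice_eq_listSlice]
      apply congrArg PySem.Chars.strip
      rw [hBs, hE, PySem.List.slice_from_natCast]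
      simp only [String.toList_ofList]
      rw [replace_single, drop_len_takeWhile]
  · rw [hfind, find_singleton_of_not_mem options.toList hB, if_pos rfl]
    have htw : options.toList.takeWhile (fun c => c ≠ 'B') = options.toList := by
      rw [List.takeWhile_eq_self_iff]
      intro c hc
      simp
      exact fun h => hB (h ▸ hc)
    have hdw : options.toList.dropWhile (fun c => c ≠ 'B') = [] := by
      rw [List.dropWhile_eq_nil_iff]
      intro c hc
      simp
      exact fun h => hB (h ▸ hc)
    apply Prod.ext
    · apply String.toList_inj.mp
      simp only [PySem.Str.toList_strip, PySem.Str.toList_replace]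
      apply congrArg PySem.Chars.strip
      rw [hA, hE, replace_single, String.toList_ofList, htw]
    · apply String.toList_inj.mp
      simp only [PySem.Str.toList_strip]
      rw [hdw]
      simp [PySem.Chars.strip, PySem.Chars.lstrip, PySem.Chars.rstrip]
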